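-- pv_equiv track=rewrite | github.com/AK-ayush/important-codes | comp-prog/foobar_4_2.py | mirror_x
-- ===== SOURCE A (Python) =====
-- def mirror_x(p, dimensions, x_itr):
--     postions = [p]
--     prev = p
--     for i in range(x_itr):
--         dx = (i+1)*dimensions[0] - prev[0]
--         # dy = dimensions[1] - prev[1]
--         nxt = [prev[0]+2*dx, prev[1]]
--         postions.append(nxt)
--         prev = nxt
--     return postions
-- ===== SOURCE B (Python) =====
-- def mirror_x(p, dimensions, x_itr):
--     # Closed form of the reflection recurrence: x_n = n*d + p[0] (n even),
--     # (n+1)*d - p[0] (n odd); y stays p[1].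
--     if x_itr < 1:
--         return [p]
--     d, x0, y = dimensions[0], p[0], p[1]
--     return [p] + [[n * d + x0, y] if n % 2 == 0 else [(n + 1) * d - x0, y]
--                   for n in range(1, x_itr + 1)]
-- ===== Notes on version B (the rewrite author's own statement) =====
-- stated objective: simpler
-- what changed: Replaces the chained reflection recurrence (each position computed from the previous one) by the closed form x_n = n*d + p[0] for even n and (n+1)*d - p[0] for odd n, building each position directly from its index.
import Mathlib
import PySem

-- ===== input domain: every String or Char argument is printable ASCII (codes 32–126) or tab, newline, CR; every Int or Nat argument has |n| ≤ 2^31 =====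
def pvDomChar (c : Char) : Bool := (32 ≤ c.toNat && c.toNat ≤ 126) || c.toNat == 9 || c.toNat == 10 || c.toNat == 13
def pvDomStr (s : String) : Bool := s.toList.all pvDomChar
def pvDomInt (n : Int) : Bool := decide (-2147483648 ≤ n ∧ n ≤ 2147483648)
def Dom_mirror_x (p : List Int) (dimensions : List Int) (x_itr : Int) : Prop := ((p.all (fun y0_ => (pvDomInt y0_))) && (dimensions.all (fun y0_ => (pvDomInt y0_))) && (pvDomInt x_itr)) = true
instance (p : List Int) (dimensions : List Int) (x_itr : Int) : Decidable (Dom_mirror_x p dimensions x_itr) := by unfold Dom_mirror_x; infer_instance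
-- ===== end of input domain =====

-- B replaces A's chained reflection recurrence by the closed form x_n = n*d+p[0] (n even) / (n+1)*d-p[0] (n odd), computing each position from its index (objective: simpler).

-- ===== PORT A =====
-- A-side helper: the body of A's for-loop (positions/prev state)
def pvStep (dimensions : List Int) (st : List (List Int) × List Int) (i : Int) :
    List (List Int) × List Int :=
  let prev := st.2
  let dx := (i + 1) * PySem.List.pyGetD dimensions 0 0 - PySem.List.pyGetD prev 0 0
  let nxt := [PySem.List.pyGetD prev 0 0 + 2 * dx, PySem.List.pyGetD prev 1 0]
  (st.1 ++ [nxt], nxt)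

def mirror_x (p : List Int) (dimensions : List Int) (x_itr : Int) : List (List Int) :=
  ((PySem.List.pyRange 0 x_itr 1).foldl (pvStep dimensions) ([p], p)).1

-- ===== PORT B =====
def mirror_x_alt (p : List Int) (dimensions : List Int) (x_itr : Int) : List (List Int) :=
  if x_itr < 1 then [p]
  else
    let d := PySem.List.pyGetD dimensions 0 0
    let x0 := PySem.List.pyGetD p 0 0
    let y := PySem.List.pyGetD p 1 0
    [p] ++ (PySem.List.pyRange 1 (x_itr + 1) 1).map
      (fun n => if PySem.Int.mod n 2 = 0 then [n * d + x0, y] else [(n + 1) * d - x0, y])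

-- ===== PRECONDITION & SPEC =====
-- Pre_ excludes exactly the inputs where Python A raises IndexError: x_itr ≥ 1 with empty dimensions or p shorter than 2.
def Pre_mirror_x (p : List Int) (dimensions : List Int) (x_itr : Int) : Prop :=
  x_itr < 1 ∨ (dimensions ≠ [] ∧ 2 ≤ p.length)
instance (p : List Int) (dimensions : List Int) (x_itr : Int) : Decidable (Pre_mirror_x p dimensions x_itr) := by unfold Pre_mirror_x; infer_instance
def pvWitness_mirror_x : List Int × List Int × Int := ([2, 3], [5, 7], 4)
def Spec_mirror_x (p : List Int) (dimensions : List Int) (x_itr : Int) (out : List (List Int)) : Prop := out = mirror_x_alt p dimensions x_itr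
instance (p : List Int) (dimensions : List Int) (x_itr : Int) (out : List (List Int)) : Decidable (Spec_mirror_x p dimensions x_itr out) := by unfold Spec_mirror_x; infer_instance

-- ===== CLAIM (what is proved, stated in full; the proofs are below) =====
def Claim_equal_mirror_x : Prop := ∀ (p : List Int) (dimensions : List Int) (x_itr : Int), Dom_mirror_x p dimensions x_itr → Pre_mirror_x p dimensions x_itr → Spec_mirror_x p dimensions x_itr (mirror_x p dimensions x_itr)

-- ===== LEMMAS AND PROOFS =====

-- the closed-form x-coordinate after n reflections
def pvXv (d x0 n : Int) : Int :=
  if PySem.Int.mod n 2 = 0 then n * d + x0 else (n + 1) * d - x0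

lemma pvMod2 (n : Int) : PySem.Int.mod n 2 = n % 2 := by
  simp [PySem.Int.mod, Int.fmod_eq_emod]

lemma pvXv_zero (d x0 : Int) : pvXv d x0 0 = x0 := by simp [pvXv]

lemma pvXv_step (d x0 : Int) (n : Int) :
    pvXv d x0 (n + 1) = 2 * (n + 1) * d - pvXv d x0 n := by
  unfold pvXv
  rw [pvMod2, pvMod2]
  rcases Int.emod_two_eq n with h | h
  · rw [h]
    have h1 : (n + 1) % 2 = 1 := by omega
    rw [h1]
    norm_num
    ring
  · rw [h]
    have h1 : (n + 1) % 2 = 0 := by omega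
    rw [h1]
    norm_num
    ring

lemma pvF_eq (d x0 y n : Int) :
    (if PySem.Int.mod n 2 = 0 then [n * d + x0, y] else [(n + 1) * d - x0, y])
      = [pvXv d x0 n, y] := by
  unfold pvXv
  split_ifs <;> rfl

lemma pvGet0 (a b : Int) : PySem.List.pyGetD [a, b] 0 0 = a := by
  simp [PySem.List.pyGetD, PySem.List.pyGet?, PySem.List.pyIdx?]

lemma pvGet1 (a b : Int) : PySem.List.pyGetD [a, b] 1 0 = b := by
  simp [PySem.List.pyGetD, PySem.List.pyGet?, PySem.List.pyIdx?]

lemma pvStep_snd (dimensions : List Int) (st : List (List Int) × List Int) (i : Int) :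
    (pvStep dimensions st i).2
      = [PySem.List.pyGetD st.2 0 0
           + 2 * ((i + 1) * PySem.List.pyGetD dimensions 0 0 - PySem.List.pyGetD st.2 0 0),
         PySem.List.pyGetD st.2 1 0] := rfl

lemma pvStep_fst (dimensions : List Int) (st : List (List Int) × List Int) (i : Int) :
    (pvStep dimensions st i).1 = st.1 ++ [(pvStep dimensions st i).2] := rfl

lemma pv_fold_inv (p dimensions : List Int) (n : Nat) :
    ((PySem.List.pyRange 0 (n : Int) 1).foldl (pvStep dimensions) ([p], p)).1
      = p :: (PySem.List.pyRange 1 ((n : Int) + 1) 1).map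
          (fun m => [pvXv (PySem.List.pyGetD dimensions 0 0) (PySem.List.pyGetD p 0 0) m,
                     PySem.List.pyGetD p 1 0])
    ∧ PySem.List.pyGetD ((PySem.List.pyRange 0 (n : Int) 1).foldl (pvStep dimensions) ([p], p)).2 0 0
        = pvXv (PySem.List.pyGetD dimensions 0 0) (PySem.List.pyGetD p 0 0) (n : Int)
    ∧ PySem.List.pyGetD ((PySem.List.pyRange 0 (n : Int) 1).foldl (pvStep dimensions) ([p], p)).2 1 0
        = PySem.List.pyGetD p 1 0 := by
  induction n with
  | zero =>
      have h0 : PySem.List.pyRange 0 (0 : Int) 1 = [] := PySem.List.pyRange_one_eq_nil (by norm_num)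
      simp [h0, pvXv_zero]
      
  | succ k ih =>
      have hsplit : PySem.List.pyRange 0 ((k : Int) + 1) 1
          = PySem.List.pyRange 0 (k : Int) 1 ++ [(k : Int)] :=
        PySem.List.pyRange_one_succ_right (by positivity)
      have hsplit2 : PySem.List.pyRange 1 (((k : Int) + 1) + 1) 1
          = PySem.List.pyRange 1 ((k : Int) + 1) 1 ++ [(k : Int) + 1] :=
        PySem.List.pyRange_one_succ_right (by omega)
      obtain ⟨ih1, ih2, ih3⟩ := ih
      have hx : pvXv (PySem.List.pyGetD dimensions 0 0) (PySem.List.pyGetD p 0 0) ((k : Int) + 1)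
          = pvXv (PySem.List.pyGetD dimensions 0 0) (PySem.List.pyGetD p 0 0) (k : Int)
            + 2 * (((k : Int) + 1) * PySem.List.pyGetD dimensions 0 0
                   - pvXv (PySem.List.pyGetD dimensions 0 0) (PySem.List.pyGetD p 0 0) (k : Int)) := by
        rw [pvXv_step]; ring
      push_cast
      rw [hsplit, hsplit2]
      simp only [List.foldl_append, List.foldl_cons, List.foldl_nil]
      refine ⟨?_, ?_, ?_⟩
      · rw [pvStep_fst, pvStep_snd, ih1, ih2, ih3, List.map_append, List.map_cons, List.map_nil,
            List.cons_append, hx]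
      · rw [pvStep_snd, pvGet0, ih2]
        exact hx.symm
      · rw [pvStep_snd, pvGet1, ih3]

-- ===== VERDICT (by name: the statement is the Claim_ definition above) =====
theorem mirror_x_spec : Claim_equal_mirror_x := by
  intro p dimensions x_itr _ _
  unfold Spec_mirror_x
  simp only [mirror_x, mirror_x_alt]
  by_cases hlt : x_itr < 1
  · have h0 : PySem.List.pyRange 0 x_itr 1 = [] := PySem.List.pyRange_one_eq_nil (by omega)
    simp [hlt, h0]
  · rw [if_neg hlt]
    have hn : x_itr = ((x_itr.toNat : Nat) : Int) := by omega
    rw [hn]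
    have h := (pv_fold_inv p dimensions x_itr.toNat).1
    rw [h]
    simp only [List.singleton_append]
    congr 1
    exact List.map_congr_left (fun m _ => (pvF_eq _ _ _ m).symm)
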